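-- pv_equiv track=rewrite | github.com/jdengoh/NTU-CS | SC1003/Part 1/TUTORIAL/TUT 6/ExampleCode Discussion #6(1).py | reverseAndOppositeCase2
-- ===== SOURCE A (Python) =====
-- def reverser(a_str):
--     if len(a_str) == 1:	# base case
--         return a_str
--     else:				# recursive step
--         new_str = reverser(a_str[1:]) + a_str[0]
--         return new_str
--
-- def reverseAndOppositeCase2(a_str): # non-recursive version
--     reversedStr = reverser(a_str)
--     resultStr = ""
--
--     for i in range(len(reversedStr)):
--         if reversedStr[i].isupper():
--             resultStr = resultStr + reversedStr[i].lower()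
--         else:
--             resultStr = resultStr + reversedStr[i].upper()
--
--     return resultStr
-- ===== SOURCE B (Python) =====
-- def reverseAndOppositeCase2(a_str):
--     out = ""
--     for c in a_str:
--         out = (c.lower() if c.isupper() else c.upper()) + out
--     return out
-- ===== Notes on version B (the rewrite author's own statement) =====
-- stated objective: simpler
-- what changed: B fuses A's two phases (a recursive reversal helper with per-call slicing, then an index loop swapping case) into one non-recursive pass that prepends each swapped character, eliminating the helper and the recursion (and its depth limit).
import Mathlib
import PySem

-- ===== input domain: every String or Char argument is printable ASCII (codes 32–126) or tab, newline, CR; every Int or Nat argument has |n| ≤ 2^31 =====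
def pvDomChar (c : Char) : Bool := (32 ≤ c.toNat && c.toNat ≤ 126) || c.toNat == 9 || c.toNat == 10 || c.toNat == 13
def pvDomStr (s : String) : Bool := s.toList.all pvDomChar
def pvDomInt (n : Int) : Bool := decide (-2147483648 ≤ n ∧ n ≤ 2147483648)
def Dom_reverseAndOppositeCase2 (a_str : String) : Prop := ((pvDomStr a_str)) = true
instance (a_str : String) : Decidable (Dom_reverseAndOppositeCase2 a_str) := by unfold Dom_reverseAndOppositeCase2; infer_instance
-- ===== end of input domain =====

-- B fuses A's recursive-reversal-then-swap-loop into one non-recursive pass prepending swapped chars (simpler).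


-- ===== PORT A =====
-- reverser: base case len == 1; else recurse on the tail and append the head.
-- On [] the Python recurses forever (RecursionError); that input is outside Pre_, the [] branch returns [].
def reverserL : List Char → List Char
  | [] => []
  | [c] => [c]
  | c :: rest@(_ :: _) => reverserL rest ++ [c]

def reverseAndOppositeCase2 (a_str : String) : String :=
  let reversedStr := reverserL a_str.toList
  String.mk (reversedStr.foldl
    (fun resultStr c =>
      if PySem.Chars.isupper c then resultStr ++ [PySem.Chars.lowerChar c]
      else resultStr ++ [PySem.Chars.upperChar c]) [])

-- ===== PORT B =====
def reverseAndOppositeCase2_alt (a_str : String) : String :=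
  String.mk (a_str.toList.foldl
    (fun out c =>
      (if PySem.Chars.isupper c then [PySem.Chars.lowerChar c] else [PySem.Chars.upperChar c]) ++ out) [])

-- ===== PRECONDITION & SPEC =====
-- Pre_ excludes only the empty string, on which A's reverser raises RecursionError.
def Pre_reverseAndOppositeCase2 (a_str : String) : Prop := a_str ≠ ""
instance (a_str : String) : Decidable (Pre_reverseAndOppositeCase2 a_str) := by unfold Pre_reverseAndOppositeCase2; infer_instance
def pvWitness_reverseAndOppositeCase2 : String := "aB c!"

def Spec_reverseAndOppositeCase2 (a_str : String) (out : String) : Prop := out = reverseAndOppositeCase2_alt a_str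
instance (a_str : String) (out : String) : Decidable (Spec_reverseAndOppositeCase2 a_str out) := by unfold Spec_reverseAndOppositeCase2; infer_instance

-- ===== CLAIM (what is proved, stated in full; the proofs are below) =====
def Claim_equal_reverseAndOppositeCase2 : Prop := ∀ (a_str : String), Dom_reverseAndOppositeCase2 a_str → Pre_reverseAndOppositeCase2 a_str → Spec_reverseAndOppositeCase2 a_str (reverseAndOppositeCase2 a_str)

-- ===== LEMMAS AND PROOFS =====
def pvSwap (c : Char) : List Char :=
  if PySem.Chars.isupper c then [PySem.Chars.lowerChar c] else [PySem.Chars.upperChar c]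

theorem reverserL_eq_reverse (l : List Char) : reverserL l = l.reverse := by
  induction l with
  | nil => simp [reverserL]
  | cons c rest ih =>
    cases rest with
    | nil => simp [reverserL]
    | cons d t => simp [reverserL, ih]

theorem foldl_append_swap (l acc : List Char) :
    l.foldl (fun r c => if PySem.Chars.isupper c then r ++ [PySem.Chars.lowerChar c]
                        else r ++ [PySem.Chars.upperChar c]) acc
      = acc ++ l.flatMap pvSwap := by
  induction l generalizing acc with
  | nil => simp
  | cons c t ih => simp [List.foldl, ih, pvSwap]; split_ifs <;> simp

theorem foldl_prepend_swap (l acc : List Char) :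
    l.foldl (fun out c => (if PySem.Chars.isupper c then [PySem.Chars.lowerChar c]
                           else [PySem.Chars.upperChar c]) ++ out) acc
      = (l.reverse.flatMap pvSwap) ++ acc := by
  induction l generalizing acc with
  | nil => simp
  | cons c t ih => simp [List.foldl, ih, pvSwap]

-- ===== VERDICT (by name: the statement is the Claim_ definition above) =====
theorem reverseAndOppositeCase2_spec : Claim_equal_reverseAndOppositeCase2 := by
  intro a_str _ _
  simp only [Spec_reverseAndOppositeCase2, reverseAndOppositeCase2, reverseAndOppositeCase2_alt,
    reverserL_eq_reverse, foldl_append_swap, foldl_prepend_swap, List.append_nil, List.nil_append]
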